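-- pv_equiv track=rewrite | github.com/quiksand/advent-of-code-2022 | aoc_8.py | get_viewable_trees
-- ===== SOURCE A (Python) =====
-- def get_viewable_trees(treeline):
--     survey = []
--     for i, tree in enumerate(treeline):
--         if i == 0:
--             survey.append(0)
--         elif tree > treeline[i-1]:
--             survey.append(survey[i-1] + 1)
--         else:
--             survey.append(1)
--     return survey
-- ===== SOURCE B (Python) =====
-- def get_viewable_trees(treeline):
--     # Segment the line into maximal strictly increasing runs and emit each run
--     # as an arithmetic range: the first run counts 0,1,2,..., every later run 1,2,3,...
--     out = []
--     n = len(treeline)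
--     i = 0
--     base = 0
--     while i < n:
--         j = i + 1                    # scan to the end of the maximal increasing run at i
--         while j < n and treeline[j] > treeline[j - 1]:
--             j += 1
--         out.extend(range(base, base + (j - i)))
--         i = j
--         base = 1
--     return out
-- ===== Notes on version B (the rewrite author's own statement) =====
-- stated objective: alternative
-- what changed: Instead of A's per-element fold that re-reads treeline[i-1] and survey[i-1], B segments the line into maximal strictly increasing runs and emits each run wholesale as an arithmetic range (0..r-1 for the first run, 1..r for later runs).
import Mathlib
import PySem

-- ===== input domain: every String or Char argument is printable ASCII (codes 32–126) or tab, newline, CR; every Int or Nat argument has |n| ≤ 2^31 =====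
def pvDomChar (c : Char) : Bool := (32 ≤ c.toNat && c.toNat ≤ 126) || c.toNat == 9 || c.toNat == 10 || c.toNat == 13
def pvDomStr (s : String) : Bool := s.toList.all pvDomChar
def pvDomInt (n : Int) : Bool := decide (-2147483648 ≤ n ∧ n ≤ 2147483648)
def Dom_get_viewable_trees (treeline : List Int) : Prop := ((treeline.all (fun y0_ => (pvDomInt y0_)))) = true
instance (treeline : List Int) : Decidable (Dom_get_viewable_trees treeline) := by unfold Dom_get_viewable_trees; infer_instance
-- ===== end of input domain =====

-- B replaces A's per-element fold by run segmentation: split into maximal strictly increasing runs and emit each run as an arithmetic range (alternative decomposition; same O(n) cost).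


-- ===== PORT A =====
-- literal transliteration of A: fold over enumerate(treeline), reading treeline[i-1]
-- and survey[i-1] by index (always in range where read, so pyGetD's default is never used)
def get_viewable_trees (treeline : List Int) : List Int :=
  (PySem.List.enumerate treeline 0).foldl
    (fun survey it =>
      if it.1 = 0 then survey ++ [0]
      else if it.2 > PySem.List.pyGetD treeline (it.1 - 1) 0 then
        survey ++ [PySem.List.pyGetD survey (it.1 - 1) 0 + 1]
      else survey ++ [1]) []

-- ===== PORT B =====
-- _run_len: length of the maximal strictly increasing prefix (the while loop walks
-- successive adjacent pairs, so it transcribes as recursion on the list structure)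
def pvRunLen : List Int → Nat
  | x :: y :: ts => if y > x then 1 + pvRunLen (y :: ts) else 1
  | _ => 1

lemma pvRunLen_pos (l : List Int) : 1 ≤ pvRunLen l := by
  match l with
  | [] => simp [pvRunLen]
  | [_] => simp [pvRunLen]
  | x :: y :: ts => unfold pvRunLen; split <;> omega

-- the while loop of B: peel one maximal run per iteration, emit it as a range
def pvGo (out : List Int) (base : Int) (rest : List Int) : List Int :=
  match rest with
  | [] => out
  | x :: xs =>
    let r := pvRunLen (x :: xs)
    pvGo (out ++ PySem.List.pyRange base (base + (r : Int)) 1) 1 ((x :: xs).drop r)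
termination_by rest.length
decreasing_by
  simp only [List.length_drop, List.length_cons]
  have := pvRunLen_pos (x :: xs)
  omega

def get_viewable_trees_alt (treeline : List Int) : List Int :=
  pvGo [] 0 treeline

-- ===== PRECONDITION & SPEC =====
def Spec_get_viewable_trees (treeline : List Int) (out : List Int) : Prop := out = get_viewable_trees_alt treeline
instance (treeline : List Int) (out : List Int) : Decidable (Spec_get_viewable_trees treeline out) := by unfold Spec_get_viewable_trees; infer_instance

-- ===== CLAIM (what is proved, stated in full; the proofs are below) =====
def Claim_equal_get_viewable_trees : Prop := ∀ (treeline : List Int), Dom_get_viewable_trees treeline → Spec_get_viewable_trees treeline (get_viewable_trees treeline)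

-- ===== LEMMAS AND PROOFS =====

-- common reference: the run-count scan with previous element `prev` and current count `c`
def pvScan (prev c : Int) : List Int → List Int
  | [] => []
  | t :: ts =>
    let c' := if t > prev then c + 1 else 1
    c' :: pvScan t c' ts

-- one step of B's while loop, re-expressed per element
lemma pvGo_step (acc : List Int) (b x y : Int) (ys : List Int) :
    pvGo acc b (x :: y :: ys) = pvGo (acc ++ [b]) (if y > x then b + 1 else 1) (y :: ys) := by
  by_cases h : y > x
  · rw [pvGo.eq_def]; conv_rhs => rw [pvGo.eq_def]
    simp only [pvRunLen, if_pos h]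
    have hr := pvRunLen_pos (y :: ys)
    have hcast : ((1 + pvRunLen (y :: ys) : Nat) : Int) = 1 + (pvRunLen (y :: ys) : Int) := by
      push_cast; ring
    rw [hcast]
    have hlt : b < b + (1 + (pvRunLen (y :: ys) : Int)) := by
      have : (1 : Int) ≤ (pvRunLen (y :: ys) : Int) := by exact_mod_cast hr
      omega
    rw [PySem.List.pyRange_one_cons hlt]
    have hdrop : List.drop (1 + pvRunLen (y :: ys)) (x :: y :: ys)
        = List.drop (pvRunLen (y :: ys)) (y :: ys) := by
      rw [Nat.add_comm]
      simp [List.drop_succ_cons]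
    rw [hdrop]
    have hb : b + (1 + (pvRunLen (y :: ys) : Int)) = (b + 1) + (pvRunLen (y :: ys) : Int) := by
      ring
    rw [hb]
    simp
  · rw [pvGo.eq_def]
    simp only [pvRunLen, if_neg h, Nat.cast_one]
    have hlt : b < b + 1 := by omega
    rw [PySem.List.pyRange_one_cons hlt]
    rw [PySem.List.pyRange_one_eq_nil (by omega)]
    simp

-- B's loop computes the reference scan
lemma pvGo_eq_scan (xs : List Int) : ∀ (x b : Int) (acc : List Int),
    pvGo acc b (x :: xs) = acc ++ b :: pvScan x b xs := by
  induction xs with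
  | nil =>
    intro x b acc
    rw [pvGo.eq_def]
    simp only [pvRunLen, pvScan, Nat.cast_one, List.drop_one, List.tail_cons]
    rw [pvGo.eq_def]
    have hlt : b < b + 1 := by omega
    rw [PySem.List.pyRange_one_cons hlt]
    rw [PySem.List.pyRange_one_eq_nil (by omega)]
  | cons y ys ih =>
    intro x b acc
    rw [pvGo_step, ih y _ (acc ++ [b])]
    simp [pvScan]

-- A's fold, started after the prefix p0 ++ [prev] with survey s0 ++ [c], computes pvScan
lemma a_gen (ys : List Int) : ∀ (p0 s0 : List Int) (prev c : Int) (rest : List Int),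
    rest = p0 ++ prev :: ys →
    s0.length = p0.length →
    (PySem.List.enumerate ys ((p0.length : Int) + 1)).foldl
      (fun survey it =>
        if it.1 = 0 then survey ++ [0]
        else if it.2 > PySem.List.pyGetD rest (it.1 - 1) 0 then
          survey ++ [PySem.List.pyGetD survey (it.1 - 1) 0 + 1]
        else survey ++ [1]) (s0 ++ [c]) = s0 ++ [c] ++ pvScan prev c ys := by
  induction ys with
  | nil => intro p0 s0 prev c rest _ _; simp [PySem.List.enumerate, pvScan]
  | cons t ts ih =>
    intro p0 s0 prev c rest hrest hlen
    rw [PySem.List.enumerate_cons, List.foldl_cons]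
    have h0 : ¬ ((p0.length : Int) + 1 = 0) := by omega
    have hsub : ((p0.length : Int) + 1) - 1 = (p0.length : Int) := by omega
    have hrest' : PySem.List.pyGetD rest (p0.length : Int) 0 = prev := by
      rw [PySem.List.pyGetD_natCast, hrest]
      simp [List.getD]
    have hsur : PySem.List.pyGetD (s0 ++ [c]) (p0.length : Int) 0 = c := by
      rw [PySem.List.pyGetD_natCast, ← hlen]
      simp [List.getD]
    simp only [if_neg h0, hsub, hrest', hsur]
    have hstep := ih (p0 ++ [prev]) (s0 ++ [c]) t (if t > prev then c + 1 else 1) rest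
      (by simp [hrest]) (by simp [hlen])
    have hcast : ((p0 ++ [prev]).length : Int) + 1 = (p0.length : Int) + 1 + 1 := by
      simp
    rw [hcast] at hstep
    by_cases hgt : t > prev
    · simp only [if_pos hgt] at hstep ⊢
      rw [hstep]
      simp [pvScan, hgt]
    · simp only [if_neg hgt] at hstep ⊢
      rw [hstep]
      simp [pvScan, hgt]

-- ===== VERDICT (by name: the statement is the Claim_ definition above) =====
theorem get_viewable_trees_spec : Claim_equal_get_viewable_trees := by
  intro treeline _
  unfold Spec_get_viewable_trees get_viewable_trees get_viewable_trees_alt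
  cases treeline with
  | nil => simp [PySem.List.enumerate, pvGo]
  | cons x xs =>
    rw [PySem.List.enumerate_cons, List.foldl_cons]
    simp only [if_true, List.nil_append, zero_add]
    have ha := a_gen xs [] [] x 0 (x :: xs) (by simp) (by simp)
    simp only [List.length_nil, Nat.cast_zero, List.nil_append, zero_add] at ha
    rw [ha, pvGo_eq_scan xs x 0 []]
    simp
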